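-- pv_equiv track=rewrite | github.com/rakesh-050791/DS-Algo | Intermediate/July-2022/15-July-2022.py | solve
-- ===== SOURCE A (Python) =====
-- def solve(A, B):
--     subArrayLen = 2 * B + 1
--     n = len(A)
--     result = []
--     noOfSubArrays = n-subArrayLen+1
--     for i in range(0, noOfSubArrays):
--         prev = -1
--         is_alternating = 1
--         for j in range(i, i+subArrayLen):
--             if A[j] == prev:
--                 is_alternating = 0
--                 break;
--             prev = A[j]
--         if is_alternating == 1:
--             result.append(i+B)
--     return result
-- ===== SOURCE B (Python) =====
-- def solve(A, B):
--     # Prefix sums of adjacent-equality flags: each window is decided by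
--     # comparing two prefix values instead of rescanning it.
--     n = len(A)
--     L = 2 * B + 1
--     if B < 0 or L > n:
--         return []
--     # pref[t] = number of positions j in 1..t with A[j] == A[j-1]
--     pref = [0]
--     c = 0
--     for j in range(1, n):
--         if A[j] == A[j - 1]:
--             c += 1
--         pref.append(c)
--     # window starting at i is alternating iff no adjacent-equal pair inside it
--     return [i + B for i in range(n - L + 1) if pref[i + L - 1] == pref[i]]
-- ===== Notes on version B (the rewrite author's own statement) =====
-- stated objective: alternative
-- what changed: Replaces the per-window rescan (an inner loop restarted with a prev=-1 sentinel for every start index) by one prefix-sum pass over adjacent-equality flags, so each window is decided by comparing two prefix values instead of being rescanned.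
-- intended difference: When B >= 0 and some length-2B+1 window with no equal adjacent elements starts with the value -1, A's prev=-1 sentinel makes the first comparison fire and A wrongly omits that window's centre; B includes it, since -1 is an ordinary array value and only adjacent equality should matter. — e.g. on solve([-1, 0], 0): A returns [1], B returns [0, 1]
-- outside the precondition, e.g. on solve([1, 2], -1): A returns [-1, 0, 1, 2], B returns []
import Mathlib
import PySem

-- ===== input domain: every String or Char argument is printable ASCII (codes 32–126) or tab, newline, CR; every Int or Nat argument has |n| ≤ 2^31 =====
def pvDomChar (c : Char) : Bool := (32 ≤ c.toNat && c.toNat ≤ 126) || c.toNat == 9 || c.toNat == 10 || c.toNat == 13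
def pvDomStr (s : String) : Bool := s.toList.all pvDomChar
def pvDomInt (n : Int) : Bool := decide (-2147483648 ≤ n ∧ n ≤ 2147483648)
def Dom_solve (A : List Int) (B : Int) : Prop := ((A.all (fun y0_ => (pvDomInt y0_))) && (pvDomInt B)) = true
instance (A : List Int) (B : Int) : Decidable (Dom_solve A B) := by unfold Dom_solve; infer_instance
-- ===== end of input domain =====

-- B decides each window by comparing two prefix sums of adjacent-equality flags instead of rescanning it (objective: alternative).

-- ===== PORT A =====
-- inner 'for j in range(i, i+subArrayLen)' loop of A, with its break (false = broke out);
-- indices are always in range for B ≥ 0, so the pyGetD default 0 is never used inside Pre_.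
def solveInner (A : List Int) : List Int → Int → Bool
  | [], _ => true
  | j :: js, prev =>
    if PySem.List.pyGetD A j 0 = prev then false
    else solveInner A js (PySem.List.pyGetD A j 0)

def solve (A : List Int) (B : Int) : List Int :=
  let subArrayLen := 2 * B + 1
  let n : Int := A.length
  let noOfSubArrays := n - subArrayLen + 1
  (PySem.List.pyRange 0 noOfSubArrays 1).foldl
    (fun result i =>
      if solveInner A (PySem.List.pyRange i (i + subArrayLen) 1) (-1)
      then result ++ [i + B] else result) []

-- ===== PORT B =====
-- 'for j in range(1, n): if A[j] == A[j-1]: c += 1; pref.append(c)'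
def prefLoop (A : List Int) : List Int → Int → List Int → List Int
  | [], _, pref => pref
  | j :: js, c, pref =>
    let c' := if PySem.List.pyGetD A j 0 = PySem.List.pyGetD A (j - 1) 0 then c + 1 else c
    prefLoop A js c' (pref ++ [c'])

def solve_alt (A : List Int) (B : Int) : List Int :=
  let n : Int := A.length
  let L := 2 * B + 1
  if B < 0 ∨ n < L then []
  else
    let pref := prefLoop A (PySem.List.pyRange 1 n 1) 0 [0]
    ((PySem.List.pyRange 0 (n - L + 1) 1).filter
      (fun i => PySem.List.pyGetD pref (i + L - 1) 0 == PySem.List.pyGetD pref i 0)).map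
      (fun i => i + B)

-- ===== PRECONDITION & SPEC =====
-- Pre_ restricts to the natural domain B ≥ 0: a negative B gives a negative window
-- length, for which A's empty inner loop vacuously accepts every start index — an
-- unspecified corner; B returns [] there.
def Pre_solve (A : List Int) (B : Int) : Prop := 0 ≤ B
instance (A : List Int) (B : Int) : Decidable (Pre_solve A B) := by unfold Pre_solve; infer_instance
def pvWitness_solve : List Int × Int := ([1, 2, 1], 1)

-- When B ≥ 0 and some length-2B+1 window with no equal adjacent elements starts with -1,
-- A's prev=-1 sentinel wrongly rejects it and A omits that centre; B includes it, since
-- -1 is an ordinary value and only adjacent equality should matter.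
def D_solve (A : List Int) (B : Int) : Prop :=
  0 ≤ B ∧ ∃ i < A.length + 1, i + (2 * B + 1).toNat ≤ A.length ∧ A.getD i 0 = -1 ∧
    ∀ j < i + (2 * B + 1).toNat, i < j → A.getD j 0 ≠ A.getD (j - 1) 0
instance (A : List Int) (B : Int) : Decidable (D_solve A B) := by unfold D_solve; infer_instance

def Spec_solve (A : List Int) (B : Int) (out : List Int) : Prop := ¬ D_solve A B → out = solve_alt A B
instance (A : List Int) (B : Int) (out : List Int) : Decidable (Spec_solve A B out) := by unfold Spec_solve; infer_instance

def pvDiffWitness_solve : List Int × Int := ([-1, 0], 0)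
def pvDiffWitnessOut_solve : (List Int) × (List Int) := ([1], [0, 1])

-- ===== CLAIM (what is proved, stated in full; the proofs are below) =====
def Claim_unchanged_solve : Prop := ∀ (A : List Int) (B : Int), Dom_solve A B → Pre_solve A B → Spec_solve A B (solve A B)
def Claim_changed_solve : Prop := Dom_solve (pvDiffWitness_solve.1) (pvDiffWitness_solve.2) ∧ Pre_solve (pvDiffWitness_solve.1) (pvDiffWitness_solve.2) ∧ D_solve (pvDiffWitness_solve.1) (pvDiffWitness_solve.2) ∧ solve (pvDiffWitness_solve.1) (pvDiffWitness_solve.2) = pvDiffWitnessOut_solve.1 ∧ solve_alt (pvDiffWitness_solve.1) (pvDiffWitness_solve.2) = pvDiffWitnessOut_solve.2 ∧ pvDiffWitnessOut_solve.1 ≠ pvDiffWitnessOut_solve.2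
def Claim_exact_solve : Prop := ∀ (A : List Int) (B : Int), Dom_solve A B → Pre_solve A B → D_solve A B → solve A B ≠ solve_alt A B

-- ===== LEMMAS AND PROOFS =====

-- 'A[j] != A[j-1] for all interior j of the window [a, b)'
def pvNoDup (A : List Int) (a b : Int) : Prop :=
  ∀ j : Int, a < j → j < b → PySem.List.pyGetD A j 0 ≠ PySem.List.pyGetD A (j - 1) 0

def pvBad (A : List Int) (j : Int) : Bool :=
  PySem.List.pyGetD A j 0 == PySem.List.pyGetD A (j - 1) 0

def pvCnt (A : List Int) (t : Int) : Int :=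
  ((PySem.List.pyRange 1 (t + 1) 1).countP (pvBad A) : Int)

lemma pvNoDup_split (A : List Int) (a b : Int) (h : a + 1 < b) :
    pvNoDup A a b ↔
      (PySem.List.pyGetD A (a + 1) 0 ≠ PySem.List.pyGetD A a 0 ∧ pvNoDup A (a + 1) b) := by
  constructor
  · intro hnd
    refine ⟨?_, ?_⟩
    · have := hnd (a + 1) (by omega) h
      simpa using this
    · intro j hj1 hj2
      exact hnd j (by omega) hj2
  · rintro ⟨hhead, htail⟩ j hj1 hj2
    by_cases hje : j = a + 1
    · subst hje; simpa using hhead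
    · exact htail j (by omega) hj2

lemma solveInner_iff (A : List Int) (b : Int) : ∀ (n : Nat) (a prev : Int),
    (b - a).toNat = n → a < b →
    (solveInner A (PySem.List.pyRange a b 1) prev = true ↔
      (PySem.List.pyGetD A a 0 ≠ prev ∧ pvNoDup A a b)) := by
  intro n
  induction n with
  | zero => intro a prev h hab; omega
  | succ n ih =>
    intro a prev h hab
    rw [PySem.List.pyRange_one_cons hab]
    simp only [solveInner]
    by_cases hprev : PySem.List.pyGetD A a 0 = prev
    · simp [hprev]
    · rw [if_neg hprev]
      by_cases hone : b ≤ a + 1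
      · have hb : b = a + 1 := by omega
        subst hb
        rw [PySem.List.pyRange_one_eq_nil (by omega)]
        simp only [solveInner]
        constructor
        · intro _
          exact ⟨hprev, fun j hj1 hj2 => by omega⟩
        · intro _; trivial
      · have hab2 : a + 1 < b := by omega
        rw [ih (a + 1) (PySem.List.pyGetD A a 0) (by omega) hab2]
        rw [pvNoDup_split A a b hab2]
        constructor
        · rintro ⟨h1, h2⟩; exact ⟨hprev, h1, h2⟩
        · rintro ⟨_, h1, h2⟩; exact ⟨h1, h2⟩

lemma prefLoop_pull (A : List Int) : ∀ (js : List Int) (c : Int) (pref : List Int),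
    prefLoop A js c pref = pref ++ prefLoop A js c [] := by
  intro js
  induction js with
  | nil => intro c pref; simp [prefLoop]
  | cons j js ih =>
    intro c pref
    simp only [prefLoop]
    rw [ih _ (pref ++ [_]), ih _ ([] ++ [_])]
    simp

lemma prefLoop_eq_map (A : List Int) (e : Int) : ∀ (n : Nat) (s c : Int), (e - s).toNat = n →
    prefLoop A (PySem.List.pyRange s e 1) c [] =
      (PySem.List.pyRange s e 1).map
        (fun j => c + ((PySem.List.pyRange s (j + 1) 1).countP (pvBad A) : Int)) := by
  intro n
  induction n with
  | zero =>
    intro s c h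
    rw [PySem.List.pyRange_one_eq_nil (by omega)]
    simp [prefLoop]
  | succ n ih =>
    intro s c h
    have hse : s < e := by omega
    rw [PySem.List.pyRange_one_cons hse]
    simp only [prefLoop]
    rw [prefLoop_pull, List.nil_append]
    rw [ih (s + 1) _ (by omega)]
    have hhead : ∀ d : Int,
        (if PySem.List.pyGetD A s 0 = PySem.List.pyGetD A (s - 1) 0 then d + 1 else d) =
          d + ((PySem.List.pyRange s (s + 1) 1).countP (pvBad A) : Int) := by
      intro d
      rw [PySem.List.pyRange_one_singleton]
      by_cases hb : PySem.List.pyGetD A s 0 = PySem.List.pyGetD A (s - 1) 0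
      · rw [if_pos hb]
        simp [pvBad, hb]
      · rw [if_neg hb]
        simp [pvBad, hb]
    rw [List.map_cons, List.singleton_append]
    congr 1
    · exact hhead c
    · apply List.map_congr_left
      intro j hj
      rw [PySem.List.mem_pyRange_one] at hj
      have hsplit : PySem.List.pyRange s (j + 1) 1 =
          PySem.List.pyRange s (s + 1) 1 ++ PySem.List.pyRange (s + 1) (j + 1) 1 :=
        PySem.List.pyRange_one_append s (s + 1) (j + 1) (by omega) (by omega)
      rw [hsplit, List.countP_append]
      rw [hhead c]
      push_cast
      ring

lemma pref_eq_map_cnt (A : List Int) (h : 1 ≤ (A.length : Int)) :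
    prefLoop A (PySem.List.pyRange 1 (A.length : Int) 1) 0 [0] =
      (PySem.List.pyRange 0 (A.length : Int) 1).map (pvCnt A) := by
  rw [prefLoop_pull, prefLoop_eq_map A (A.length : Int) ((A.length : Int) - 1).toNat 1 0 rfl]
  rw [PySem.List.pyRange_one_cons (by omega : (0:Int) < (A.length : Int))]
  rw [List.map_cons]
  have h0 : pvCnt A 0 = 0 := by
    unfold pvCnt
    rw [PySem.List.pyRange_one_eq_nil (by omega)]
    simp
  rw [h0, List.singleton_append]
  norm_num
  intro j _ _
  unfold pvCnt
  ring

lemma pref_getD (A : List Int) (i : Int) (h0 : 0 ≤ i) (hi : i < (A.length : Int)) :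
    PySem.List.pyGetD (prefLoop A (PySem.List.pyRange 1 (A.length : Int) 1) 0 [0]) i 0 =
      pvCnt A i := by
  rw [pref_eq_map_cnt A (by omega)]
  exact PySem.List.pyGetD_map_pyRange_of_nonneg (pvCnt A) (A.length : Int) i 0 h0 hi

lemma cnt_eq_iff_noDup (A : List Int) (i L : Int) (h0 : 0 ≤ i) (hL : 0 < L) :
    (pvCnt A (i + L - 1) = pvCnt A i) ↔ pvNoDup A i (i + L) := by
  unfold pvCnt
  have h1 : i + L - 1 + 1 = i + L := by ring
  rw [h1]
  have hsplit : PySem.List.pyRange 1 (i + L) 1 =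
      PySem.List.pyRange 1 (i + 1) 1 ++ PySem.List.pyRange (i + 1) (i + L) 1 :=
    PySem.List.pyRange_one_append 1 (i + 1) (i + L) (by omega) (by omega)
  rw [hsplit, List.countP_append]
  constructor
  · intro heq j hj1 hj2
    have hz : (PySem.List.pyRange (i + 1) (i + L) 1).countP (pvBad A) = 0 := by omega
    rw [List.countP_eq_zero] at hz
    have := hz j (by rw [PySem.List.mem_pyRange_one]; omega)
    simpa [pvBad] using this
  · intro hnd
    have hz : (PySem.List.pyRange (i + 1) (i + L) 1).countP (pvBad A) = 0 := by
      rw [List.countP_eq_zero]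
      intro j hj
      rw [PySem.List.mem_pyRange_one] at hj
      have := hnd j (by omega) (by omega)
      simpa [pvBad] using this
    omega

lemma condA_char (A : List Int) (B i : Int) (h0 : 0 ≤ i) (hB : 0 ≤ B) :
    (solveInner A (PySem.List.pyRange i (i + (2 * B + 1)) 1) (-1) = true) ↔
      (PySem.List.pyGetD A i 0 ≠ -1 ∧ pvNoDup A i (i + (2 * B + 1))) :=
  solveInner_iff A (i + (2 * B + 1)) (i + (2 * B + 1) - i).toNat i (-1) rfl (by omega)

lemma condB_char (A : List Int) (B i : Int) (h0 : 0 ≤ i) (_hB : 0 ≤ B)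
    (hwin : i + (2 * B + 1) ≤ (A.length : Int)) :
    ((PySem.List.pyGetD (prefLoop A (PySem.List.pyRange 1 (A.length : Int) 1) 0 [0])
        (i + (2 * B + 1) - 1) 0 ==
      PySem.List.pyGetD (prefLoop A (PySem.List.pyRange 1 (A.length : Int) 1) 0 [0]) i 0) = true) ↔
      pvNoDup A i (i + (2 * B + 1)) := by
  rw [beq_iff_eq]
  rw [pref_getD A (i + (2 * B + 1) - 1) (by omega) (by omega)]
  rw [pref_getD A i h0 (by omega)]
  exact cnt_eq_iff_noDup A i (2 * B + 1) h0 (by omega)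

lemma D_of (A : List Int) (B : Int) (i : Int) (h0 : 0 ≤ i) (hB : 0 ≤ B)
    (hwin : i + (2 * B + 1) ≤ (A.length : Int))
    (hm : PySem.List.pyGetD A i 0 = -1) (hnd : pvNoDup A i (i + (2 * B + 1))) :
    D_solve A B := by
  have hK : ((2 * B + 1).toNat : Int) = 2 * B + 1 := Int.toNat_of_nonneg (by omega)
  refine ⟨hB, i.toNat, by omega, by omega, ?_, ?_⟩
  · have hin : i = (i.toNat : Int) := (Int.toNat_of_nonneg h0).symm
    rw [hin, PySem.List.pyGetD_natCast] at hm
    exact hm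
  · intro j hj1 hj2
    have := hnd (j : Int) (by omega) (by omega)
    rw [PySem.List.pyGetD_natCast] at this
    have hj1n : ((j - 1 : Nat) : Int) = (j : Int) - 1 := by omega
    rw [← hj1n, PySem.List.pyGetD_natCast] at this
    exact this

lemma noDup_of_D (A : List Int) (B : Int) (i : Nat)
    (hnd : ∀ j < i + (2 * B + 1).toNat, i < j → A.getD j 0 ≠ A.getD (j - 1) 0)
    (hB : 0 ≤ B) :
    pvNoDup A (i : Int) ((i : Int) + (2 * B + 1)) := by
  have hK : ((2 * B + 1).toNat : Int) = 2 * B + 1 := Int.toNat_of_nonneg (by omega)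
  intro j hj1 hj2
  have hj0 : 0 ≤ j := by omega
  have hjn : j = (j.toNat : Int) := (Int.toNat_of_nonneg hj0).symm
  have h1 : j.toNat < i + (2 * B + 1).toNat := by omega
  have h2 : i < j.toNat := by omega
  have := hnd j.toNat h1 h2
  rw [hjn, PySem.List.pyGetD_natCast]
  have hj1n : ((j.toNat - 1 : Nat) : Int) = (j.toNat : Int) - 1 := by omega
  rw [← hj1n, PySem.List.pyGetD_natCast]
  exact this

lemma countP_lt {α : Type} (l : List α) (p q : α → Bool)
    (hmono : ∀ x ∈ l, p x = true → q x = true)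
    (x : α) (hx : x ∈ l) (hq : q x = true) (hp : p x = false) :
    l.countP p < l.countP q := by
  obtain ⟨l1, l2, rfl⟩ := List.append_of_mem hx
  have h1 : l1.countP p ≤ l1.countP q :=
    List.countP_mono_left (fun y hy => hmono y (by simp [hy]))
  have h2 : l2.countP p ≤ l2.countP q :=
    List.countP_mono_left (fun y hy => hmono y (by simp [hy]))
  simp [List.countP_append, hp, hq]
  omega

-- ===== VERDICT (by name: the statement is the Claim_ definition above) =====
theorem solve_spec : Claim_unchanged_solve := by
  intro A B _ hpre
  have hB : 0 ≤ B := hpre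
  unfold Spec_solve
  intro hnd
  by_cases hc : (A.length : Int) < 2 * B + 1
  · simp only [solve, solve_alt]
    rw [if_pos (Or.inr hc)]
    rw [PySem.List.pyRange_one_eq_nil (by omega)]
    rfl
  · simp only [solve, solve_alt]
    rw [if_neg (by push Not; exact ⟨by omega, by omega⟩)]
    rw [PySem.List.foldl_append_if]
    rw [List.nil_append]
    congr 1
    apply List.filter_congr
    intro i hi
    rw [PySem.List.mem_pyRange_one] at hi
    have hwin : i + (2 * B + 1) ≤ (A.length : Int) := by omega
    rw [Bool.eq_iff_iff]
    rw [condA_char A B i hi.1 hB, condB_char A B i hi.1 hB hwin]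
    constructor
    · exact fun h => h.2
    · intro hndp
      refine ⟨?_, hndp⟩
      intro hmi
      exact hnd (D_of A B i hi.1 hB hwin hmi hndp)

theorem solve_changed : Claim_changed_solve := by unfold Claim_changed_solve; decide

theorem solve_tight : Claim_exact_solve := by
  intro A B _ hpre hd
  obtain ⟨hB, i, hilt, hiK, hm, hndN⟩ := hd
  have hK : ((2 * B + 1).toNat : Int) = 2 * B + 1 := Int.toNat_of_nonneg (by omega)
  have hwin : (i : Int) + (2 * B + 1) ≤ (A.length : Int) := by omega
  have hndI : pvNoDup A (i : Int) ((i : Int) + (2 * B + 1)) := noDup_of_D A B i hndN hB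
  have hmI : PySem.List.pyGetD A (i : Int) 0 = -1 := by
    rw [PySem.List.pyGetD_natCast]; exact hm
  simp only [solve, solve_alt]
  rw [if_neg (by push Not; exact ⟨by omega, by omega⟩)]
  rw [PySem.List.foldl_append_if]
  rw [List.nil_append]
  intro heq
  have hlen := congrArg List.length heq
  rw [List.length_map, List.length_map, ← List.countP_eq_length_filter,
    ← List.countP_eq_length_filter] at hlen
  have hlt := countP_lt (PySem.List.pyRange 0 ((A.length : Int) - (2 * B + 1) + 1) 1)
    (fun x => solveInner A (PySem.List.pyRange x (x + (2 * B + 1)) 1) (-1))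
    (fun x => PySem.List.pyGetD (prefLoop A (PySem.List.pyRange 1 (A.length : Int) 1) 0 [0])
        (x + (2 * B + 1) - 1) 0 ==
      PySem.List.pyGetD (prefLoop A (PySem.List.pyRange 1 (A.length : Int) 1) 0 [0]) x 0)
    (fun x hx hpx => by
      rw [PySem.List.mem_pyRange_one] at hx
      rw [condA_char A B x hx.1 hB] at hpx
      exact (condB_char A B x hx.1 hB (by omega)).mpr hpx.2)
    (i : Int)
    (by rw [PySem.List.mem_pyRange_one]; omega)
    ((condB_char A B (i : Int) (by omega) hB hwin).mpr hndI)
    (by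
      rw [Bool.eq_false_iff]
      intro hpx
      rw [condA_char A B (i : Int) (by omega) hB] at hpx
      exact hpx.1 hmI)
  omega
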